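-- pv_equiv track=rewrite | github.com/starshipagentic/launchgherk | launch2.py | parse_gherkin_content
-- ===== SOURCE A (Python) =====
-- from typing import List, Dict, Optional
--
-- def parse_gherkin_content(content: str) -> List[tuple]:
--     """Parse LLM-generated Gherkin content into feature files"""
--     features = []
--     current_feature = []
--     current_name = None
--
--     for line in content.split('\n'):
--         if line.startswith('Feature:'):
--             # Save previous feature if exists
--             if current_feature and current_name:
--                 features.append((f"{current_name.lower().replace(' ', '_')}.feature",
--                                '\n'.join(current_feature)))
--             # Start new feature
--             current_name = line.split('Feature:')[1].strip()
--             current_feature = [line]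
--         else:
--             if current_feature is not None:  # Only append if we've started a feature
--                 current_feature.append(line)
--
--     # Add the last feature
--     if current_feature and current_name:
--         features.append((f"{current_name.lower().replace(' ', '_')}.feature",
--                        '\n'.join(current_feature)))
--
--     return features
-- ===== SOURCE B (Python) =====
-- def _take_until_feature(lines):
--     """Lines up to (not including) the next 'Feature:' line."""
--     body = []
--     for l in lines:
--         if l.startswith('Feature:'):
--             break
--         body.append(l)
--     return body
--
--
-- def parse_gherkin_content(content):
--     """Parse LLM-generated Gherkin content into feature files."""
--     lines = content.split('\n')
--     # drop the preamble before the first 'Feature:' line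
--     pre = _take_until_feature(lines)
--     lines = lines[len(pre):]
--     out = []
--     while lines:
--         head = lines[0]
--         body = _take_until_feature(lines[1:])
--         name = head.split('Feature:')[1].strip()
--         if name:
--             out.append((name.lower().replace(' ', '_') + '.feature',
--                         '\n'.join([head] + body)))
--         lines = lines[1 + len(body):]
--     return out
-- ===== Notes on version B (the rewrite author's own statement) =====
-- stated objective: simpler
-- what changed: Replaces A's single stateful loop carrying features/current_feature/current_name across iterations with direct block extraction: drop the preamble, then repeatedly slice off one 'Feature:' block (head line plus lines up to the next 'Feature:' line) and emit it if its name is non-empty.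
import Mathlib
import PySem

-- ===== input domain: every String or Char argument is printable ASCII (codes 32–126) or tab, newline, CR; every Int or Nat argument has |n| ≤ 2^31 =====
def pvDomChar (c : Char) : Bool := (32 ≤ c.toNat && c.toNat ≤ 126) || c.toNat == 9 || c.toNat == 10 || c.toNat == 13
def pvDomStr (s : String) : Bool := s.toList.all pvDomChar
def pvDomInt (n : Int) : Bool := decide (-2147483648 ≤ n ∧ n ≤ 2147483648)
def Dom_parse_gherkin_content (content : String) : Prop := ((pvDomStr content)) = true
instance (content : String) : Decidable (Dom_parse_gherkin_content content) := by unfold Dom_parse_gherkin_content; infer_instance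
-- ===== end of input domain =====

-- B replaces A's single stateful loop (features/current_feature/current_name carried across
-- iterations) by direct block extraction: drop the preamble, then repeatedly cut off one
-- 'Feature:' block (head line + lines up to the next 'Feature:' line); objective: simpler.

-- shared transliteration of the identical expressions both sources contain
-- line.startswith('Feature:')
def pvIsFeat (l : String) : Bool := PySem.Str.startswith l "Feature:"
-- line.split('Feature:')[1].strip(); the [1] index is guarded by startswith in both
-- programs (split then has ≥ 2 parts), so the getD default is unreachable
def pvNameOf (l : String) : String :=
  PySem.Str.strip ((PySem.List.pyGet? ((PySem.Str.split? l "Feature:").getD []) 1).getD "")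
-- f"{name.lower().replace(' ', '_')}.feature"
def pvFname (n : String) : String :=
  PySem.Str.replace (PySem.Str.lower n) " " "_" ++ ".feature"

-- ===== PORT A =====
-- the loop body of A, state (features, current_feature, current_name);
-- A's 'if current_feature is not None' is always true (current_feature is always a list)
def pvGoA : List String → List (String × String) → List String → Option String →
    List (String × String)
  | [], feats, cur, name =>
      -- trailing 'if current_feature and current_name: features.append(...)'
      feats ++ (match name with
        | none => []
        | some n => if cur ≠ [] ∧ n ≠ "" then [(pvFname n, PySem.Str.join "\n" cur)] else [])
  | l :: ls, feats, cur, name =>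
      if pvIsFeat l then
        pvGoA ls
          (feats ++ (match name with
            | none => []
            | some n => if cur ≠ [] ∧ n ≠ "" then [(pvFname n, PySem.Str.join "\n" cur)] else []))
          [l] (some (pvNameOf l))
      else
        pvGoA ls feats (cur ++ [l]) name

def parse_gherkin_content (content : String) : List (String × String) :=
  pvGoA ((PySem.Str.split? content "\n").getD []) [] [] none

-- ===== PORT B =====
-- _take_until_feature(lines)
def pvTakeUntilFeature : List String → List String
  | [] => []
  | l :: ls => if pvIsFeat l then [] else l :: pvTakeUntilFeature ls

-- the 'while lines:' loop of B (lines always starts with a 'Feature:' line here)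
-- (Source B's locals body/name are inlined; the fuel argument only makes the recursion
-- structural — it starts at the list length and never runs out, see pvGoB_congr below)
def pvGoB : Nat → List String → List (String × String)
  | _, [] => []
  | 0, _ :: _ => []
  | fuel + 1, head :: rest =>
      (if pvNameOf head ≠ "" then
        [(pvFname (pvNameOf head),
          PySem.Str.join "\n" (head :: pvTakeUntilFeature rest))]
       else []) ++ pvGoB fuel (rest.drop (pvTakeUntilFeature rest).length)

def parse_gherkin_content_alt (content : String) : List (String × String) :=
  let lines := (PySem.Str.split? content "\n").getD []
  let pre := pvTakeUntilFeature lines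
  pvGoB (lines.drop pre.length).length (lines.drop pre.length)

-- ===== PRECONDITION & SPEC =====
def Spec_parse_gherkin_content (content : String) (out : List (String × String)) : Prop := out = parse_gherkin_content_alt content
instance (content : String) (out : List (String × String)) : Decidable (Spec_parse_gherkin_content content out) := by unfold Spec_parse_gherkin_content; infer_instance

-- ===== CLAIM (what is proved, stated in full; the proofs are below) =====
def Claim_equal_parse_gherkin_content : Prop := ∀ (content : String), Dom_parse_gherkin_content content → Spec_parse_gherkin_content content (parse_gherkin_content content)

-- ===== LEMMAS AND PROOFS =====

-- pvTakeUntilFeature is takeWhile, and dropping its length is dropWhile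
theorem pvTakeUntil_eq_takeWhile (ls : List String) :
    pvTakeUntilFeature ls = ls.takeWhile (fun l => !pvIsFeat l) := by
  induction ls with
  | nil => rfl
  | cons l ls ih =>
    simp only [pvTakeUntilFeature, List.takeWhile_cons]
    by_cases h : pvIsFeat l <;> simp [h, ih]

theorem pvDrop_takeWhile (ls : List String) :
    ls.drop (ls.takeWhile (fun l => !pvIsFeat l)).length = ls.dropWhile (fun l => !pvIsFeat l) := by
  induction ls with
  | nil => rfl
  | cons l ls ih =>
    simp only [List.takeWhile_cons, List.dropWhile_cons]
    by_cases h : pvIsFeat l <;> simp [h, ih]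

-- the fuel is irrelevant as long as it is at least the list length
theorem pvGoB_congr (f : Nat) : ∀ (g : Nat) (ls : List String),
    ls.length ≤ f → ls.length ≤ g → pvGoB f ls = pvGoB g ls := by
  induction f with
  | zero =>
    intro g ls hf _
    cases ls with
    | nil => cases g <;> rfl
    | cons l ls => simp at hf
  | succ f ih =>
    intro g ls hf hg
    cases ls with
    | nil => cases g <;> rfl
    | cons l ls =>
      cases g with
      | zero => simp at hg
      | succ g =>
        simp only [pvGoB]
        rw [ih g (ls.drop (pvTakeUntilFeature ls).length)
          (by simp only [List.length_drop]; simp at hf; omega)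
          (by simp only [List.length_drop]; simp at hg; omega)]

-- pvGoB with exactly enough fuel, the form the invariants use
def pvGoBC (ls : List String) : List (String × String) := pvGoB ls.length ls

theorem pvGoBC_cons (l : String) (ls : List String) :
    pvGoBC (l :: ls) =
      (if pvNameOf l ≠ "" then
        [(pvFname (pvNameOf l),
          PySem.Str.join "\n" (l :: ls.takeWhile (fun l => !pvIsFeat l)))]
       else []) ++ pvGoBC (ls.dropWhile (fun l => !pvIsFeat l)) := by
  unfold pvGoBC
  simp only [List.length_cons, pvGoB]
  rw [pvGoB_congr ls.length (ls.drop (pvTakeUntilFeature ls).length).length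
      (ls.drop (pvTakeUntilFeature ls).length)
      (by simp only [List.length_drop]; omega) (le_refl _)]
  simp only [pvTakeUntil_eq_takeWhile, pvDrop_takeWhile]

-- main invariant: A's loop with an open block (cur, some n), cur ≠ [], produces the
-- pending block (extended by the following non-feature lines) and then B's blocks
theorem pvGoA_some (ls : List String) : ∀ (feats : List (String × String))
    (cur : List String) (n : String), cur ≠ [] →
    pvGoA ls feats cur (some n) =
      feats ++
        (if n ≠ "" then
          [(pvFname n, PySem.Str.join "\n" (cur ++ ls.takeWhile (fun l => !pvIsFeat l)))]
         else []) ++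
        pvGoBC (ls.dropWhile (fun l => !pvIsFeat l)) := by
  induction ls with
  | nil =>
    intro feats cur n hcur
    simp [pvGoA, pvGoBC, pvGoB, hcur]
  | cons l ls ih =>
    intro feats cur n hcur
    by_cases h : pvIsFeat l
    · rw [pvGoA]
      simp only [h, if_pos]
      rw [ih _ [l] (pvNameOf l) (by simp)]
      simp [h, pvGoBC_cons, hcur, List.append_assoc]
    · rw [pvGoA]
      simp only [h, if_neg, Bool.false_eq_true, not_false_iff]
      rw [ih feats (cur ++ [l]) n (by simp)]
      simp [h, List.append_assoc]

-- preamble phase: with name = None nothing can ever be emitted from cur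
theorem pvGoA_none (ls : List String) : ∀ (feats : List (String × String))
    (cur : List String),
    pvGoA ls feats cur none = feats ++ pvGoBC (ls.dropWhile (fun l => !pvIsFeat l)) := by
  induction ls with
  | nil => intro feats cur; simp [pvGoA, pvGoBC, pvGoB]
  | cons l ls ih =>
    intro feats cur
    by_cases h : pvIsFeat l
    · rw [pvGoA]
      simp only [h, if_pos]
      rw [pvGoA_some ls _ [l] (pvNameOf l) (by simp)]
      simp [h, pvGoBC_cons, List.append_assoc]
    · rw [pvGoA]
      simp only [h, if_neg, Bool.false_eq_true, not_false_iff]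
      rw [ih feats (cur ++ [l])]
      simp [h]

-- ===== VERDICT (by name: the statement is the Claim_ definition above) =====
theorem parse_gherkin_content_spec : Claim_equal_parse_gherkin_content := by
  intro content _
  unfold Spec_parse_gherkin_content parse_gherkin_content parse_gherkin_content_alt
  rw [pvGoA_none]
  simp only [pvTakeUntil_eq_takeWhile, pvDrop_takeWhile, List.nil_append]
  rfl
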